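-- pv_equiv track=rewrite | github.com/makoyyylouie/tomato-ai | app.py | normalize_disease_name
-- ===== SOURCE A (Python) =====
-- def normalize_disease_name(disease_name):
--     normalized = disease_name.lower().strip()
--
--     prefixes_to_remove = ["tomato ", "tomato_", "tomato-"]
--     for prefix in prefixes_to_remove:
--         if normalized.startswith(prefix):
--             normalized = normalized[len(prefix):]
--
--     normalized = normalized.replace('-', '_').replace(' ', '_')
--
--     while '__' in normalized:
--         normalized = normalized.replace('__', '_')
--
--     normalized = normalized.strip('_')
--
--     return normalized
-- ===== SOURCE B (Python) =====
-- def normalize_disease_name(disease_name):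
--     normalized = disease_name.lower().strip()
--
--     prefixes_to_remove = ["tomato ", "tomato_", "tomato-"]
--     for prefix in prefixes_to_remove:
--         if normalized.startswith(prefix):
--             normalized = normalized[len(prefix):]
--
--     # tokenize on runs of separators, then join once with '_'
--     words = []
--     current = ""
--     for ch in normalized:
--         if ch in " _-":
--             if current:
--                 words.append(current)
--                 current = ""
--         else:
--             current += ch
--     if current:
--         words.append(current)
--     return "_".join(words)
-- ===== Notes on version B (the rewrite author's own statement) =====
-- stated objective: idiomatic
-- what changed: The replace/while-collapse/strip tail of A is replaced by a single tokenizing pass that collects separator-free words and joins them once with an underscore; the repeated whole-string collapse scans disappear.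
import Mathlib
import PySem

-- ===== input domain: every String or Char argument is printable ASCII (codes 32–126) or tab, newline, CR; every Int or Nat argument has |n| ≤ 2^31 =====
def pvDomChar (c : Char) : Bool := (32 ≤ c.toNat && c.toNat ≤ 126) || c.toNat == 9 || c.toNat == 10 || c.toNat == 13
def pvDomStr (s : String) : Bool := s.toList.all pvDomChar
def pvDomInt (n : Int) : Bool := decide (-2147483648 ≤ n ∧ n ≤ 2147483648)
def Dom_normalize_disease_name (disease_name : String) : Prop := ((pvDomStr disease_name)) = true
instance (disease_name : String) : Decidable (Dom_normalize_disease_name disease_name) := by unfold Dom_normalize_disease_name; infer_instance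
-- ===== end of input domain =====

-- B replaces A's replace/while-collapse/strip tail by a single tokenizing pass (collect separator-free words, join once with '_'); return values agree on all inputs.

-- ===== PORT A =====
-- pvRep2 and the lemmas up to pvReplaceDD_length exist only to justify termination
-- of the 'while "__" in normalized' loop (pvReplaceDD_length is cited in
-- decreasing_by); the port itself calls PySem.Chars.replace exactly as the Python does.
def pvRep2 : List Char → List Char
  | [] => []
  | [c] => [c]
  | c :: d :: t => if c = '_' ∧ d = '_' then '_' :: pvRep2 t else c :: pvRep2 (d :: t)

theorem pvRep2_pair (t : List Char) : pvRep2 ('_' :: '_' :: t) = '_' :: pvRep2 t := by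
  rw [pvRep2, if_pos ⟨rfl, rfl⟩]

theorem pvReplaceGoDD (fuel : Nat) : ∀ (l acc : List Char), l.length ≤ fuel →
    PySem.Chars.replace.go ['_', '_'] ['_'] fuel l acc = acc.reverse ++ pvRep2 l := by
  induction fuel with
  | zero =>
    intro l acc h
    cases l with
    | nil => rw [PySem.Chars.replace.go.eq_def]; simp [pvRep2]
    | cons c t => simp at h
  | succ n ih =>
    intro l acc h
    cases l with
    | nil => rw [PySem.Chars.replace.go.eq_def]; simp [pvRep2]
    | cons c t =>
      rw [PySem.Chars.replace.go.eq_def]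
      simp only [Nat.succ_eq_add_one]
      by_cases hp : (['_', '_'] : List Char).isPrefixOf (c :: t) = true
      · cases t with
        | nil => simp [List.isPrefixOf] at hp
        | cons d t' =>
          have hc : c = '_' ∧ d = '_' := by
            simp [List.isPrefixOf] at hp
            exact ⟨hp.1.symm, hp.2.symm⟩
          obtain ⟨hc1, hc2⟩ := hc; subst hc1; subst hc2
          rw [if_pos hp]
          have ht' : t'.length ≤ n := by simp at h; omega
          rw [show List.drop (['_', '_'] : List Char).length ('_' :: '_' :: t') = t' from rfl]
          rw [ih t' _ ht', pvRep2_pair]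
          simp
      · rw [if_neg hp]
        have ht : t.length ≤ n := by simp at h; omega
        rw [ih t (c :: acc) ht]
        cases t with
        | nil => simp [pvRep2]
        | cons d t' =>
          have hne : ¬ (c = '_' ∧ d = '_') := by
            intro ⟨h1, h2⟩; subst h1; subst h2
            exact hp (by simp [List.isPrefixOf])
          rw [pvRep2, if_neg hne]
          simp

theorem pvReplaceDD (s : List Char) :
    PySem.Chars.replace s ['_', '_'] ['_'] = pvRep2 s := by
  unfold PySem.Chars.replace
  rw [if_neg (by simp)]
  rw [pvReplaceGoDD s.length s [] le_rfl]
  simp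

theorem pvRep2_len_le (s : List Char) : (pvRep2 s).length ≤ s.length := by
  match s with
  | [] => simp [pvRep2]
  | [c] => simp [pvRep2]
  | c :: d :: t =>
    by_cases h : c = '_' ∧ d = '_'
    · rw [pvRep2, if_pos h]
      have := pvRep2_len_le t
      simp; omega
    · rw [pvRep2, if_neg h]
      have := pvRep2_len_le (d :: t)
      simp at this ⊢; omega
termination_by s.length

theorem pvRep2_len_lt (s : List Char) (h : ['_', '_'] <:+: s) :
    (pvRep2 s).length < s.length := by
  match s with
  | [] => simp at h
  | [c] => have := h.length_le; simp at this
  | c :: d :: t =>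
    by_cases hcd : c = '_' ∧ d = '_'
    · rw [pvRep2, if_pos hcd]
      have := pvRep2_len_le t
      simp; omega
    · rw [pvRep2, if_neg hcd]
      have hdt : ['_', '_'] <:+: (d :: t) := by
        rcases List.infix_cons_iff.mp h with hpre | hinf
        · exfalso
          obtain ⟨u, hu⟩ := hpre
          injection hu with h1 h2
          injection h2 with h3 h4
          exact hcd ⟨h1.symm, h3.symm⟩
        · exact hinf
      have := pvRep2_len_lt (d :: t) hdt
      simp at this ⊢; omega
termination_by s.length

theorem pvReplaceDD_length (s : List Char) (h : PySem.Chars.isIn ['_', '_'] s = true) :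
    (PySem.Chars.replace s ['_', '_'] ['_']).length < s.length := by
  rw [pvReplaceDD]
  exact pvRep2_len_lt s ((PySem.Chars.isIn_iff_infix _ _).mp h)

-- while '__' in normalized: normalized = normalized.replace('__', '_')
def pvCollapseA (s : List Char) : List Char :=
  if PySem.Chars.isIn ['_', '_'] s then pvCollapseA (PySem.Chars.replace s ['_', '_'] ['_']) else s
termination_by s.length
decreasing_by exact pvReplaceDD_length s (by assumption)

def normalize_disease_name (disease_name : String) : String :=
  let normalized := PySem.Chars.strip (PySem.Chars.lower disease_name.toList)
  let normalized := ["tomato ".toList, "tomato_".toList, "tomato-".toList].foldl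
    (fun n p => if PySem.Chars.startswith n p then PySem.Chars.slice n (some (PySem.Chars.len p : Int)) none else n)
    normalized
  let normalized := PySem.Chars.replace (PySem.Chars.replace normalized ['-'] ['_']) [' '] ['_']
  let normalized := pvCollapseA normalized
  String.ofList (PySem.Chars.stripChars normalized ['_'])

-- ===== PORT B =====
def normalize_disease_name_alt (disease_name : String) : String :=
  let normalized := PySem.Chars.strip (PySem.Chars.lower disease_name.toList)
  let normalized := ["tomato ".toList, "tomato_".toList, "tomato-".toList].foldl
    (fun n p => if PySem.Chars.startswith n p then PySem.Chars.slice n (some (PySem.Chars.len p : Int)) none else n)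
    normalized
  let st := normalized.foldl
    (fun (st : List (List Char) × List Char) ch =>
      if [' ', '_', '-'].contains ch then
        (if st.2.isEmpty then st else (st.1 ++ [st.2], []))
      else (st.1, st.2 ++ [ch]))
    ([], [])
  let words := if st.2.isEmpty then st.1 else st.1 ++ [st.2]
  String.ofList (PySem.Chars.join ['_'] words)

-- ===== PRECONDITION & SPEC =====
def Spec_normalize_disease_name (disease_name : String) (out : String) : Prop := out = normalize_disease_name_alt disease_name
instance (disease_name : String) (out : String) : Decidable (Spec_normalize_disease_name disease_name out) := by unfold Spec_normalize_disease_name; infer_instance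

-- ===== CLAIM (what is proved, stated in full; the proofs are below) =====
def Claim_equal_normalize_disease_name : Prop := ∀ (disease_name : String), Dom_normalize_disease_name disease_name → Spec_normalize_disease_name disease_name (normalize_disease_name disease_name)

-- ===== LEMMAS AND PROOFS =====

theorem pvRep2_cons_ne {c : Char} (t : List Char) (h : c ≠ '_') :
    pvRep2 (c :: t) = c :: pvRep2 t := by
  cases t with
  | nil => rfl
  | cons d t' => rw [pvRep2, if_neg (fun hh => h hh.1)]

theorem pvRep2_us_cons {d : Char} (t : List Char) (h : d ≠ '_') :
    pvRep2 ('_' :: d :: t) = '_' :: pvRep2 (d :: t) := by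
  rw [pvRep2, if_neg (fun hh => h hh.2)]


-- B's separator test and A's post-replace separator test
def pvSep (c : Char) : Bool := c == ' ' || c == '_' || c == '-'
def pvMid (c : Char) : Bool := c == ' ' || c == '_'
def pvU (c : Char) : Bool := c == '_'

-- the separator-free words of s, in order: the canonical form both tails reach
def pvWords (p : Char → Bool) : List Char → List (List Char)
  | [] => []
  | c :: t =>
    if p c then pvWords p t
    else (c :: t.takeWhile (fun x => !p x)) :: pvWords p (t.dropWhile (fun x => !p x))
termination_by s => s.length
decreasing_by
  all_goals simp only [List.length_cons]
  all_goals first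
    | exact Nat.lt_succ_of_le (List.length_dropWhile_le _ t)
    | omega

theorem pvWords_nil (p : Char → Bool) : pvWords p [] = [] := by rw [pvWords]

theorem pvWords_sep {p : Char → Bool} {c : Char} (t : List Char) (h : p c = true) :
    pvWords p (c :: t) = pvWords p t := by rw [pvWords, if_pos h]

theorem pvWords_word {p : Char → Bool} {c : Char} (t : List Char) (h : p c = false) :
    pvWords p (c :: t) =
      (c :: t.takeWhile (fun x => !p x)) :: pvWords p (t.dropWhile (fun x => !p x)) := by
  rw [pvWords, if_neg (by simp [h])]

-- B's loop pieces, named so the lemmas can talk about them (defeq to the port's inline code)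
def pvStep (st : List (List Char) × List Char) (ch : Char) : List (List Char) × List Char :=
  if [' ', '_', '-'].contains ch then
    (if st.2.isEmpty then st else (st.1 ++ [st.2], []))
  else (st.1, st.2 ++ [ch])

def pvFinish (st : List (List Char) × List Char) : List (List Char) :=
  if st.2.isEmpty then st.1 else st.1 ++ [st.2]

theorem pv_contains (c : Char) : ([' ', '_', '-'].contains c) = pvSep c := by
  by_cases h1 : c = ' '
  · subst h1; decide
  · by_cases h2 : c = '_'
    · subst h2; decide
    · by_cases h3 : c = '-'
      · subst h3; decide
      · have e1 : (c == ' ') = false := by simp [h1]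
        have e2 : (c == '_') = false := by simp [h2]
        have e3 : (c == '-') = false := by simp [h3]
        simp only [List.contains_cons, List.contains_nil, pvSep, e1, e2, e3, Bool.or_self]

theorem pv_take_app (p : Char → Bool) (w y : List Char) (h : ∀ x ∈ w, p x = true) :
    (w ++ y).takeWhile p = w ++ y.takeWhile p ∧ (w ++ y).dropWhile p = y.dropWhile p := by
  induction w with
  | nil => simp
  | cons a w' ih =>
    have ha := h a (by simp)
    have ih' := ih (fun x hx => h x (by simp [hx]))
    simp [ha, ih'.1, ih'.2]

theorem pv_dropWhile_all (p : Char → Bool) (l : List Char) (h : ∀ x ∈ l, p x = false) :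
    List.dropWhile p l = l := by
  cases l with
  | nil => rfl
  | cons a t => rw [List.dropWhile_cons, if_neg (by simp [h a (by simp)])]

theorem pv_dropWhile_head (p : Char → Bool) {l : List Char} {a : Char} {t : List Char}
    (h : List.dropWhile p l = a :: t) : p a = false := by
  induction l with
  | nil => simp at h
  | cons b l' ih =>
    rw [List.dropWhile_cons] at h
    by_cases hb : p b = true
    · rw [if_pos hb] at h; exact ih h
    · rw [if_neg hb] at h
      injection h with h1 _
      subst h1; simpa using hb

theorem pvWords_all (p : Char → Bool) (a : Char) (w' : List Char)
    (hall : ∀ x ∈ a :: w', p x = false) : pvWords p (a :: w') = [a :: w'] := by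
  have hd : List.dropWhile (fun x => !p x) w' = [] :=
    List.dropWhile_eq_nil_iff.mpr (fun x hx => by simp [hall x (by simp [hx])])
  have htk : List.takeWhile (fun x => !p x) w' = w' := by
    conv_rhs => rw [← List.takeWhile_append_dropWhile (p := fun x => !p x) (l := w')]
    rw [hd, List.append_nil]
  rw [pvWords_word _ (hall a (by simp)), htk, hd, pvWords_nil]

theorem pvWords_word_sep (p : Char → Bool) (a : Char) (w' : List Char) (c : Char) (t : List Char)
    (hall : ∀ x ∈ a :: w', p x = false) (hc : p c = true) :
    pvWords p ((a :: w') ++ c :: t) = (a :: w') :: pvWords p t := by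
  have ha : p a = false := hall a (by simp)
  rw [List.cons_append, pvWords_word _ ha]
  have h1 := pv_take_app (fun x => !p x) w' (c :: t)
    (fun x hx => by simp [hall x (by simp [hx])])
  rw [h1.1, h1.2]
  rw [List.takeWhile_cons, if_neg (by simp [hc])]
  rw [List.dropWhile_cons, if_neg (by simp [hc])]
  rw [pvWords_sep _ hc, List.append_nil]

theorem pvLoop_spec (s : List Char) : ∀ (ws : List (List Char)) (cur : List Char),
    (∀ c ∈ cur, pvSep c = false) →
    pvFinish (s.foldl pvStep (ws, cur)) = ws ++ pvWords pvSep (cur ++ s) := by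
  induction s with
  | nil =>
    intro ws cur hcur
    rw [List.foldl_nil, List.append_nil]
    cases cur with
    | nil => simp [pvFinish, pvWords_nil]
    | cons a w' =>
      rw [pvFinish, if_neg (by simp)]
      rw [pvWords_all pvSep a w' hcur]
  | cons ch t ih =>
    intro ws cur hcur
    rw [List.foldl_cons]
    by_cases hs : pvSep ch = true
    · rw [show pvStep (ws, cur) ch = (if cur.isEmpty then (ws, cur) else (ws ++ [cur], [])) from by
        unfold pvStep; rw [pv_contains ch, if_pos hs]]
      cases cur with
      | nil =>
        rw [show (if (([] : List Char).isEmpty = true) then (ws, ([] : List Char)) else (ws ++ [[]], []))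
            = (ws, ([] : List Char)) from by simp]
        rw [ih ws [] (by simp)]
        rw [List.nil_append, List.nil_append, pvWords_sep _ hs]
      | cons a w' =>
        rw [show (if ((a :: w').isEmpty = true) then (ws, a :: w') else (ws ++ [a :: w'], []))
            = (ws ++ [a :: w'], ([] : List Char)) from by simp]
        rw [ih (ws ++ [a :: w']) [] (by simp)]
        rw [List.nil_append, pvWords_word_sep pvSep a w' ch t hcur hs]
        simp
    · have hsf : pvSep ch = false := by simpa using hs
      rw [show pvStep (ws, cur) ch = (ws, cur ++ [ch]) from by
        unfold pvStep; rw [pv_contains ch, if_neg (by simp [hsf])]]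
      rw [ih ws (cur ++ [ch]) (by
        intro c hc
        rcases List.mem_append.mp hc with h1 | h1
        · exact hcur c h1
        · simp at h1; subst h1; exact hsf)]
      simp [List.append_assoc]

-- A-side: the collapse loop keeps the words and removes every '__'
theorem pvRep2_head_us (t : List Char) : ∃ r, pvRep2 ('_' :: t) = '_' :: r := by
  cases t with
  | nil => exact ⟨[], rfl⟩
  | cons d t' =>
    by_cases hd : d = '_'
    · subst hd; exact ⟨pvRep2 t', pvRep2_pair t'⟩
    · exact ⟨pvRep2 (d :: t'), pvRep2_us_cons t' hd⟩

theorem pvRep2_td (t : List Char) :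
    List.takeWhile (fun x => !pvU x) t = List.takeWhile (fun x => !pvU x) (pvRep2 t) ∧
    List.dropWhile (fun x => !pvU x) (pvRep2 t) = pvRep2 (List.dropWhile (fun x => !pvU x) t) := by
  induction t with
  | nil => exact ⟨rfl, rfl⟩
  | cons a t' ih =>
    by_cases ha : a = '_'
    · subst ha
      obtain ⟨r, hr⟩ := pvRep2_head_us t'
      rw [hr]
      constructor
      · rw [List.takeWhile_cons, List.takeWhile_cons]
        simp [pvU]
      · rw [List.dropWhile_cons, List.dropWhile_cons]
        simp only [pvU]
        rw [if_neg (by simp), if_neg (by simp)]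
        exact hr.symm
    · have hab : (!pvU a) = true := by simp [pvU, ha]
      rw [pvRep2_cons_ne t' ha]
      constructor
      · rw [List.takeWhile_cons, List.takeWhile_cons, if_pos hab, if_pos hab, ih.1]
      · rw [List.dropWhile_cons, List.dropWhile_cons, if_pos hab, if_pos hab, ih.2]

theorem pvWords_rep2 (s : List Char) : pvWords pvU (pvRep2 s) = pvWords pvU s := by
  cases s with
  | nil => rfl
  | cons c t =>
    by_cases hc : c = '_'
    · subst hc
      cases t with
      | nil => rfl
      | cons d t' =>
        by_cases hd : d = '_'
        · subst hd
          rw [pvRep2_pair]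
          rw [pvWords_sep _ (by rfl), pvWords_sep _ (by rfl), pvWords_sep _ (by rfl)]
          exact pvWords_rep2 t'
        · rw [pvRep2_us_cons t' hd]
          rw [pvWords_sep _ (by rfl), pvWords_sep _ (by rfl)]
          exact pvWords_rep2 (d :: t')
    · have hcb : pvU c = false := by simp [pvU, hc]
      rw [pvRep2_cons_ne t hc]
      rw [pvWords_word _ hcb, pvWords_word _ hcb]
      have htd := pvRep2_td t
      rw [← htd.1, htd.2]
      rw [pvWords_rep2 (t.dropWhile (fun x => !pvU x))]
termination_by s.length
decreasing_by
  all_goals simp only [List.length_cons]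
  all_goals first
    | exact Nat.lt_succ_of_le (Nat.le_succ_of_le (List.length_dropWhile_le _ t))
    | exact Nat.lt_succ_of_le (List.length_dropWhile_le _ t)
    | omega

theorem pvCollapse_spec (s : List Char) :
    PySem.Chars.isIn ['_', '_'] (pvCollapseA s) = false ∧
    pvWords pvU (pvCollapseA s) = pvWords pvU s := by
  rw [pvCollapseA]
  by_cases h : PySem.Chars.isIn ['_', '_'] s = true
  · rw [if_pos h]
    obtain ⟨h1, h2⟩ := pvCollapse_spec (PySem.Chars.replace s ['_', '_'] ['_'])
    refine ⟨h1, ?_⟩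
    rw [h2, pvReplaceDD, pvWords_rep2]
  · rw [if_neg h]
    exact ⟨by simpa using h, rfl⟩
termination_by s.length
decreasing_by exact pvReplaceDD_length s h

-- strip('_') of a string with no '__' is the '_'-join of its words
def pvStripR (u : List Char) : List Char := (List.dropWhile pvU u.reverse).reverse

theorem pvStripR_all (u : List Char) (h : ∀ x ∈ u, pvU x = false) : pvStripR u = u := by
  unfold pvStripR
  rw [pv_dropWhile_all pvU u.reverse (fun x hx => h x (List.mem_reverse.mp hx))]
  exact List.reverse_reverse u

theorem pvStripR_append (x y : List Char) (hy : ∃ a ∈ y, pvU a = false) :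
    pvStripR (x ++ y) = x ++ pvStripR y := by
  unfold pvStripR
  rw [List.reverse_append, List.dropWhile_append]
  have hne : List.dropWhile pvU y.reverse ≠ [] := by
    intro h0
    obtain ⟨a, ha, hf⟩ := hy
    have := List.dropWhile_eq_nil_iff.mp h0 a (List.mem_reverse.mpr ha)
    rw [hf] at this; simp at this
  rw [if_neg (by simpa using hne)]
  rw [List.reverse_append, List.reverse_reverse]

theorem pvStripR_join (u : List Char) (hdd : ¬ (['_', '_'] <:+: u)) (hh : ∀ t, u ≠ '_' :: t) :
    pvStripR u = PySem.Chars.join ['_'] (pvWords pvU u) := by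
  cases hu0 : u with
  | nil => simp [pvStripR, pvWords_nil, PySem.Chars.join_nil]
  | cons c t =>
    rw [hu0] at hdd hh
    have hc : c ≠ '_' := fun h => hh t (by rw [h])
    have hcb : pvU c = false := by simp [pvU, hc]
    rcases hdrop : t.dropWhile (fun x => !pvU x) with _ | ⟨d, r''⟩
    · have ht : t = t.takeWhile (fun x => !pvU x) := by
        conv_lhs => rw [← List.takeWhile_append_dropWhile (p := fun x => !pvU x) (l := t)]
        rw [hdrop, List.append_nil]
      have hall : ∀ x ∈ c :: t, pvU x = false := by
        intro x hx
        rcases List.mem_cons.mp hx with h1 | h1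
        · subst h1; exact hcb
        · have : x ∈ t.takeWhile (fun x => !pvU x) := ht ▸ h1
          simpa using List.mem_takeWhile_imp this
      rw [pvWords_word _ hcb, hdrop, pvWords_nil, PySem.Chars.join_singleton]
      rw [pvStripR_all _ hall, ← ht]
    · have hd : d = '_' := by
        have hhd := pv_dropWhile_head _ hdrop
        simpa [pvU] using hhd
      subst hd
      have ht : t = t.takeWhile (fun x => !pvU x) ++ '_' :: r'' := by
        conv_lhs => rw [← List.takeWhile_append_dropWhile (p := fun x => !pvU x) (l := t)]
        rw [hdrop]
      have hwall : ∀ x ∈ t.takeWhile (fun x => !pvU x), pvU x = false :=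
        fun x hx => by simpa using List.mem_takeWhile_imp hx
      rcases r'' with _ | ⟨e, t''⟩
      · -- only a trailing underscore
        rw [pvWords_word _ hcb, hdrop, pvWords_sep _ (by rfl), pvWords_nil,
          PySem.Chars.join_singleton]
        have hu : c :: t = (c :: t.takeWhile (fun x => !pvU x)) ++ ['_'] := by
          conv_lhs => rw [ht]
          rfl
        rw [hu]
        unfold pvStripR
        rw [List.reverse_append]
        rw [show (['_'] : List Char).reverse = ['_'] from rfl]
        rw [List.singleton_append]
        rw [show List.dropWhile pvU ('_' :: (c :: List.takeWhile (fun x => !pvU x) t).reverse)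
            = List.dropWhile pvU ((c :: List.takeWhile (fun x => !pvU x) t).reverse) from by
          rw [List.dropWhile_cons, if_pos (by rfl)]]
        rw [pv_dropWhile_all pvU _ (by
          intro x hx
          rcases List.mem_cons.mp (List.mem_reverse.mp hx) with h1 | h1
          · subst h1; exact hcb
          · exact hwall x h1)]
        exact List.reverse_reverse _
      · have he : e ≠ '_' := by
          intro h; subst h
          apply hdd
          have hpre : (['_', '_'] : List Char) <+: ('_' :: '_' :: t'') := ⟨t'', rfl⟩
          have hsuf : ('_' :: '_' :: t'') <:+ t := hdrop ▸ List.dropWhile_suffix _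
          exact (hpre.isInfix.trans hsuf.isInfix).trans (List.suffix_cons c t).isInfix
        have heb : pvU e = false := by simp [pvU, he]
        have hsuf2 : (e :: t'') <:+ c :: t := by
          have h1 : (e :: t'') <:+ ('_' :: e :: t'') := List.suffix_cons _ _
          have h2 : ('_' :: e :: t'') <:+ t := hdrop ▸ List.dropWhile_suffix _
          exact (h1.trans h2).trans (List.suffix_cons c t)
        have hdd' : ¬ (['_', '_'] <:+: (e :: t'')) := fun hin => hdd (hin.trans hsuf2.isInfix)
        have hh2 : ∀ t0, (e :: t'') ≠ '_' :: t0 := by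
          intro t0 h0
          rw [List.cons.injEq] at h0
          exact he h0.1
        have hrec := pvStripR_join (e :: t'') hdd' hh2
        rw [pvWords_word _ hcb, hdrop, pvWords_sep _ (by rfl)]
        rw [pvWords_word _ heb, PySem.Chars.join_cons_cons, ← pvWords_word _ heb]
        have hu : c :: t = ((c :: t.takeWhile (fun x => !pvU x)) ++ ['_']) ++ (e :: t'') := by
          conv_lhs => rw [ht]
          simp
        rw [hu, pvStripR_append _ _ ⟨e, by simp, heb⟩, hrec]
termination_by u.length
decreasing_by
  have h0 := congrArg List.length hu0
  have h1 := congrArg List.length ht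
  simp only [List.length_cons, List.length_append] at h0 h1 ⊢
  omega

theorem pv_contains_us (c : Char) : ((['_'] : List Char).contains c) = pvU c := by
  by_cases h : c = '_'
  · subst h; decide
  · have e : (c == '_') = false := by simp [h]
    simp only [List.contains_cons, List.contains_nil, pvU, e, Bool.or_false]

theorem pvStrip_eq (u : List Char) :
    PySem.Chars.stripChars u ['_'] = pvStripR (List.dropWhile pvU u) := by
  have hfun : (fun c : Char => (['_'] : List Char).contains c) = pvU := funext pv_contains_us
  simp only [PySem.Chars.stripChars, pvStripR, hfun]

theorem pvWords_dropU (u : List Char) :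
    pvWords pvU (List.dropWhile pvU u) = pvWords pvU u := by
  induction u with
  | nil => rfl
  | cons a t ih =>
    by_cases ha : pvU a = true
    · rw [List.dropWhile_cons, if_pos ha, ih, pvWords_sep _ ha]
    · rw [List.dropWhile_cons, if_neg ha]

theorem pvWords_map (p q : Char → Bool) (f : Char → Char)
    (hf : ∀ c, q (f c) = p c) (hid : ∀ c, p c = false → f c = c) (l : List Char) :
    pvWords q (l.map f) = pvWords p l := by
  cases l with
  | nil => rw [List.map_nil, pvWords_nil, pvWords_nil]
  | cons c t =>
    rw [List.map_cons]
    by_cases hc : p c = true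
    · rw [pvWords_sep _ (by rw [hf c]; exact hc), pvWords_sep _ hc]
      exact pvWords_map p q f hf hid t
    · have hcf : p c = false := by simpa using hc
      have hfc : f c = c := hid c hcf
      have hq : q (f c) = false := by rw [hf c]; exact hcf
      rw [pvWords_word _ hq, pvWords_word _ hcf, hfc]
      have hcomp : (fun x => !q x) ∘ f = (fun x => !p x) := funext (fun x => by simp [hf x])
      have htk : (t.map f).takeWhile (fun x => !q x) = t.takeWhile (fun x => !p x) := by
        rw [List.takeWhile_map, hcomp]
        have hfix : ∀ x ∈ t.takeWhile (fun x => !p x), f x = id x := by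
          intro x hx
          exact hid x (by simpa using List.mem_takeWhile_imp hx)
        rw [List.map_congr_left hfix, List.map_id]
      have hdr : (t.map f).dropWhile (fun x => !q x) = (t.dropWhile (fun x => !p x)).map f := by
        rw [List.dropWhile_map, hcomp]
      rw [htk, hdr]
      rw [pvWords_map p q f hf hid (t.dropWhile (fun x => !p x))]
termination_by l.length
decreasing_by
  · simp
  · have h := List.length_dropWhile_le (fun x => !p x) t
    simp only [List.length_cons]; omega

theorem pvReplaceGoSingle (a b : Char) (fuel : Nat) : ∀ (l acc : List Char), l.length ≤ fuel →
    PySem.Chars.replace.go [a] [b] fuel l acc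
      = acc.reverse ++ l.map (fun c => if c == a then b else c) := by
  induction fuel with
  | zero =>
    intro l acc h
    cases l with
    | nil => rw [PySem.Chars.replace.go.eq_def]; simp
    | cons c t => simp at h
  | succ n ih =>
    intro l acc h
    cases l with
    | nil => rw [PySem.Chars.replace.go.eq_def]; simp
    | cons c t =>
      rw [PySem.Chars.replace.go.eq_def]
      simp only [Nat.succ_eq_add_one]
      have ht : t.length ≤ n := by simp at h; omega
      by_cases hp : ([a] : List Char).isPrefixOf (c :: t) = true
      · have hca : a = c := by simpa [List.isPrefixOf] using hp
        subst hca
        rw [if_pos hp]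
        rw [show List.drop ([a] : List Char).length (a :: t) = t from rfl]
        rw [ih t _ ht]
        simp
      · have hca : ¬ a = c := by simpa [List.isPrefixOf] using hp
        rw [if_neg hp, ih t (c :: acc) ht]
        have hb : (c == a) = false := by simp; exact fun h' => hca h'.symm
        rw [List.map_cons, hb]
        simp

theorem pvReplaceSingle (s : List Char) (a b : Char) :
    PySem.Chars.replace s [a] [b] = s.map (fun c => if c == a then b else c) := by
  unfold PySem.Chars.replace
  rw [if_neg (by simp)]
  rw [pvReplaceGoSingle a b s.length s [] le_rfl]
  simp

theorem pv_hf1 (c : Char) :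
    pvMid ((fun c => if c == '-' then '_' else c) c) = pvSep c := by
  by_cases h : c = '-' <;> simp [pvMid, pvSep, h]

theorem pv_hid1 (c : Char) (h : pvSep c = false) :
    (fun c => if c == '-' then '_' else c) c = c := by
  by_cases hc : c = '-'
  · subst hc; simp [pvSep] at h
  · simp [hc]

theorem pv_hf2 (c : Char) :
    pvU ((fun c => if c == ' ' then '_' else c) c) = pvMid c := by
  by_cases h : c = ' ' <;> simp [pvU, pvMid, h]

theorem pv_hid2 (c : Char) (h : pvMid c = false) :
    (fun c => if c == ' ' then '_' else c) c = c := by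
  by_cases hc : c = ' '
  · subst hc; simp [pvMid] at h
  · simp [hc]

theorem pv_tails_eq (u : List Char) :
    PySem.Chars.stripChars
      (pvCollapseA (PySem.Chars.replace (PySem.Chars.replace u ['-'] ['_']) [' '] ['_'])) ['_']
    = PySem.Chars.join ['_'] (pvFinish (u.foldl pvStep ([], []))) := by
  have key : ∀ m : List Char,
      PySem.Chars.stripChars (pvCollapseA m) ['_'] = PySem.Chars.join ['_'] (pvWords pvU m) := by
    intro m
    obtain ⟨hno, hw⟩ := pvCollapse_spec m
    have hnd : ¬ (['_', '_'] <:+: pvCollapseA m) := (PySem.Chars.isIn_eq_false_iff _ _).mp hno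
    rw [pvStrip_eq]
    have hvd : ¬ (['_', '_'] <:+: List.dropWhile pvU (pvCollapseA m)) :=
      fun h => hnd (h.trans (List.dropWhile_suffix pvU).isInfix)
    have hvh : ∀ t, List.dropWhile pvU (pvCollapseA m) ≠ '_' :: t := by
      intro t htv
      have := pv_dropWhile_head pvU htv
      simp [pvU] at this
    rw [pvStripR_join _ hvd hvh, pvWords_dropU, hw]
  rw [pvReplaceSingle, pvReplaceSingle, key]
  rw [pvWords_map pvMid pvU (fun c => if c == ' ' then '_' else c) pv_hf2 pv_hid2]
  rw [pvWords_map pvSep pvMid (fun c => if c == '-' then '_' else c) pv_hf1 pv_hid1]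
  rw [pvLoop_spec u [] [] (by simp)]
  simp

-- ===== VERDICT (by name: the statement is the Claim_ definition above) =====
theorem normalize_disease_name_spec : Claim_equal_normalize_disease_name := by
  intro s _
  unfold Spec_normalize_disease_name normalize_disease_name normalize_disease_name_alt
  exact congrArg String.ofList (pv_tails_eq _)
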